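-- pv_equiv track=rewrite | github.com/lucijanraspovic/StudentPortfolioLucijanRaspovic | mmi projekt/Simetrične i antisimetrične matrice/Zadatak 14.py | formatiraj_matrice
-- ===== SOURCE A (Python) =====
-- def formatiraj_matrice(naslov, matrice, limit=None):
--     rezultat = [f"\n=== {naslov} ===\n"]
--     for i, matrica in enumerate(matrice, 1):
--         if limit and i > limit:
--             rezultat.append(f"... ({len(matrice) - limit} matrica nije prikazano)\n")
--             break
--         rezultat.append(f"Matrica #{i}:\n")
--         rezultat.extend([" ".join(map(str, red)) + "\n" for red in matrica])
--         rezultat.append("\n")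
--     return "".join(rezultat)
-- ===== SOURCE B (Python) =====
-- def formatiraj_matrice(naslov, matrice, limit=None):
--     def tijelo(ostale, i):
--         if not ostale:
--             return ""
--         if limit and i > limit:
--             return f"... ({len(matrice) - limit} matrica nije prikazano)\n"
--         blok = f"Matrica #{i}:\n"
--         for red in ostale[0]:
--             blok += " ".join(str(x) for x in red) + "\n"
--         return blok + "\n" + tijelo(ostale[1:], i + 1)
--     return f"\n=== {naslov} ===\n" + tijelo(matrice, 1)
-- ===== Notes on version B (the rewrite author's own statement) =====
-- stated objective: alternative
-- what changed: Replaces the enumerate-with-break loop over a list accumulator joined at the end by a recursive decomposition that builds the report tail-first by string concatenation, with an inner string-accumulator loop per matrix.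
import Mathlib
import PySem

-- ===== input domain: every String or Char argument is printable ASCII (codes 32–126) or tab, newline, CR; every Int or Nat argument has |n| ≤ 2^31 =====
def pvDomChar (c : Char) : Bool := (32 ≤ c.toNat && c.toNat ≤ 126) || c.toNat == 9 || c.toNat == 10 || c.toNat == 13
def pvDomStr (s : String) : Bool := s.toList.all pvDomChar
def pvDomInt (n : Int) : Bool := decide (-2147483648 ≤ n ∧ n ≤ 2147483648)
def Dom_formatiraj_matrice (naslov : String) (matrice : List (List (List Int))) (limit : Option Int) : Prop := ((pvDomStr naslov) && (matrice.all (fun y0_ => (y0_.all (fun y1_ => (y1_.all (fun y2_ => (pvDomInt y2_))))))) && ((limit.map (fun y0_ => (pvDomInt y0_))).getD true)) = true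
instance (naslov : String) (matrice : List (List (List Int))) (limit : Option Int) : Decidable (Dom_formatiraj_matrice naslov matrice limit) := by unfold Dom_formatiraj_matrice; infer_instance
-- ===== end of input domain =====

-- B replaces A's enumerate-with-break accumulator loop (joined at the end) by a recursive
-- decomposition that builds the report tail-first by string concatenation (objective: alternative).


-- ===== PORT A =====
-- " ".join(map(str, red)) + "\n"   (the same row expression occurs verbatim in both Pythons)
def pvRow (red : List Int) : String :=
  PySem.Str.join " " (red.map PySem.Int.toStr) ++ "\n"

-- f"... ({len(matrice) - limit} matrica nije prikazano)\n"   (verbatim in both Pythons)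
def pvOverflow (n l : Int) : String :=
  "... (" ++ PySem.Int.toStr (n - l) ++ " matrica nije prikazano)\n"

-- `if limit and i > limit` (limit is truthy iff some nonzero int)   (verbatim in both Pythons)
def pvCond (limit : Option Int) (i : Int) : Bool :=
  match limit with
  | none => false
  | some l => decide (l ≠ 0 ∧ i > l)

-- the for-loop of A: enumerate from 1, append pieces to the list, break with the overflow line
def pvLoopA (n : Int) (limit : Option Int) :
    List (List (List Int)) → Int → List String → List String
  | [], _, acc => acc
  | matrica :: rest, i, acc =>
    if pvCond limit i then
      acc ++ [pvOverflow n (limit.getD 0)]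
    else
      pvLoopA n limit rest (i + 1)
        (acc ++ [("Matrica #" ++ PySem.Int.toStr i ++ ":\n")] ++ matrica.map pvRow ++ ["\n"])

def formatiraj_matrice (naslov : String) (matrice : List (List (List Int))) (limit : Option Int) : String :=
  PySem.Str.join ""
    (pvLoopA (matrice.length : Int) limit matrice 1 ["\n=== " ++ naslov ++ " ===\n"])

-- ===== PORT B =====
-- the inner `for red in ostale[0]: blok += …` string-accumulator loop
def pvBlokB (i : Int) (matrica : List (List Int)) : String :=
  matrica.foldl (fun blok red => blok ++ pvRow red)
    ("Matrica #" ++ PySem.Int.toStr i ++ ":\n")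

-- def tijelo(ostale, i): the recursive body builder (captures matrice and limit)
def pvTijelo (n : Int) (limit : Option Int) :
    List (List (List Int)) → Int → String
  | [], _ => ""
  | m :: ostale, i =>
    if pvCond limit i then pvOverflow n (limit.getD 0)
    else pvBlokB i m ++ "\n" ++ pvTijelo n limit ostale (i + 1)

def formatiraj_matrice_alt (naslov : String) (matrice : List (List (List Int))) (limit : Option Int) : String :=
  "\n=== " ++ naslov ++ " ===\n" ++ pvTijelo (matrice.length : Int) limit matrice 1

-- ===== PRECONDITION & SPEC =====
def Spec_formatiraj_matrice (naslov : String) (matrice : List (List (List Int))) (limit : Option Int) (out : String) : Prop := out = formatiraj_matrice_alt naslov matrice limit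
instance (naslov : String) (matrice : List (List (List Int))) (limit : Option Int) (out : String) : Decidable (Spec_formatiraj_matrice naslov matrice limit out) := by unfold Spec_formatiraj_matrice; infer_instance

-- ===== CLAIM (what is proved, stated in full; the proofs are below) =====
def Claim_equal_formatiraj_matrice : Prop := ∀ (naslov : String) (matrice : List (List (List Int))) (limit : Option Int), Dom_formatiraj_matrice naslov matrice limit → Spec_formatiraj_matrice naslov matrice limit (formatiraj_matrice naslov matrice limit)

-- ===== LEMMAS AND PROOFS =====

-- char-level content of a list of strings
def pvTL (ss : List String) : List Char := (ss.map String.toList).flatten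

theorem pvChars_join_empty (l : List (List Char)) :
    PySem.Chars.join [] l = l.flatten := by
  match l with
  | [] => simp [PySem.Chars.join_nil]
  | [a] => simp [PySem.Chars.join_singleton]
  | a :: b :: t =>
    rw [PySem.Chars.join_cons_cons, pvChars_join_empty (b :: t)]
    simp

theorem pvJoinE (ss : List String) : (PySem.Str.join "" ss).toList = pvTL ss := by
  rw [PySem.Str.toList_join]
  simp [pvChars_join_empty, pvTL]

theorem pvTL_append (xs ys : List String) : pvTL (xs ++ ys) = pvTL xs ++ pvTL ys := by
  simp [pvTL]

-- loopA appends to its accumulator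
theorem pvLoopA_acc (n : Int) (limit : Option Int) (rest : List (List (List Int)))
    (i : Int) (acc : List String) :
    pvLoopA n limit rest i acc = acc ++ pvLoopA n limit rest i [] := by
  induction rest generalizing i acc with
  | nil => simp [pvLoopA]
  | cons m t ih =>
    simp only [pvLoopA]
    by_cases h : pvCond limit i = true
    · simp [h]
    · simp only [h, if_false, Bool.false_eq_true]
      have hih := ih (i + 1)
      rw [hih, hih]
      simp
      rw [hih (("Matrica #" ++ PySem.Int.toStr i ++ ":\n") :: (List.map pvRow m ++ ["\n"]))]
      simp

-- the string-accumulator loop of pvBlokB, char-level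
theorem pvBlokB_fold (m : List (List Int)) (s : String) :
    (m.foldl (fun blok red => blok ++ pvRow red) s).toList
      = s.toList ++ pvTL (m.map pvRow) := by
  induction m generalizing s with
  | nil => simp [pvTL]
  | cons r t ih =>
    simp only [List.foldl_cons, ih, List.map_cons]
    simp [pvTL]

-- the loop of A and the recursion of B produce the same characters
theorem pvLoopA_eq_tijelo (n : Int) (limit : Option Int)
    (rest : List (List (List Int))) (i : Int) :
    pvTL (pvLoopA n limit rest i []) = (pvTijelo n limit rest i).toList := by
  induction rest generalizing i with
  | nil => simp [pvLoopA, pvTijelo, pvTL]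
  | cons m t ih =>
    by_cases h : pvCond limit i = true
    · simp [pvLoopA, pvTijelo, h, pvTL]
    · simp only [pvLoopA, pvTijelo, h, Bool.false_eq_true, if_false]
      rw [pvLoopA_acc, pvTL_append, ih (i + 1)]
      simp only [List.nil_append, String.toList_append]
      rw [pvBlokB, pvBlokB_fold]
      simp [pvTL]

-- ===== VERDICT (by name: the statement is the Claim_ definition above) =====
theorem formatiraj_matrice_spec : Claim_equal_formatiraj_matrice := by
  intro naslov matrice limit _
  show _ = _
  apply String.toList_inj.mp
  unfold formatiraj_matrice formatiraj_matrice_alt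
  rw [pvLoopA_acc, pvJoinE, pvTL_append, pvLoopA_eq_tijelo]
  simp [pvTL]
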